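-- pv_equiv track=rewrite | github.com/EnterOgawa/p-model | scripts/cosmology/fetch_desi_dr1_bao_y1data.py | _find_table_y1data
-- ===== SOURCE A (Python) =====
-- from typing import Any, Dict, List, Optional, Tuple
--
-- def _find_table_y1data(tex_lines: List[str]) -> Tuple[int, int]:
--     """
--     Return (start_idx, end_idx) inclusive slice for the tabular rows (data lines).
--     """
--     start = None
--     end = None
--     for i, line in enumerate(tex_lines):
--         # 条件分岐: `"\\label{tab:Y1data}" in line` を満たす経路を評価する。
--         if "\\label{tab:Y1data}" in line:
--             # Search backwards for begin{tabular} and forward for end{tabular}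
--             # so we don't depend on exact formatting.
--             start = i
--             break
--
--     # 条件分岐: `start is None` を満たす経路を評価する。
--
--     if start is None:
--         raise ValueError("could not find \\\\label{tab:Y1data} in TeX")
--
--     tab_begin = None
--     for j in range(start, -1, -1):
--         # 条件分岐: `"\\begin{tabular" in tex_lines[j]` を満たす経路を評価する。
--         if "\\begin{tabular" in tex_lines[j]:
--             tab_begin = j
--             break
--
--     # 条件分岐: `tab_begin is None` を満たす経路を評価する。
--
--     if tab_begin is None:
--         raise ValueError("could not find \\\\begin{tabular} for tab:Y1data")
--
--     tab_end = None
--     for j in range(start, len(tex_lines)):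
--         # 条件分岐: `"\\end{tabular" in tex_lines[j]` を満たす経路を評価する。
--         if "\\end{tabular" in tex_lines[j]:
--             tab_end = j
--             break
--
--     # 条件分岐: `tab_end is None` を満たす経路を評価する。
--
--     if tab_end is None:
--         raise ValueError("could not find \\\\end{tabular} for tab:Y1data")
--
--     # Data rows: after header hline block until the closing hline/end.
--     # We'll parse any row with 8 '&' fields and ending with '\\'.
--
--     return tab_begin, tab_end
-- ===== SOURCE B (Python) =====
-- from typing import List, Tuple
--
-- def _find_table_y1data(tex_lines: List[str]) -> Tuple[int, int]:
--     """
--     Return (start_idx, end_idx) inclusive slice for the tabular rows (data lines).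
--
--     Single forward pass: remember the most recent '\\begin{tabular' line; on the
--     first '\\label{tab:Y1data}' line, that remembered index is tab_begin, and the
--     first '\\end{tabular' line from here on is tab_end.
--     """
--     last_begin = None
--     for i, line in enumerate(tex_lines):
--         if "\\begin{tabular" in line:
--             last_begin = i
--         if "\\label{tab:Y1data}" in line:
--             if last_begin is None:
--                 raise ValueError("could not find \\\\begin{tabular} for tab:Y1data")
--             for j in range(i, len(tex_lines)):
--                 if "\\end{tabular" in tex_lines[j]:
--                     return last_begin, j
--             raise ValueError("could not find \\\\end{tabular} for tab:Y1data")
--     raise ValueError("could not find \\\\label{tab:Y1data} in TeX")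
-- ===== Notes on version B (the rewrite author's own statement) =====
-- stated objective: alternative
-- what changed: Replaces A's three index-based scans (find label, then a backward scan for begin, then a forward scan for end) with one forward pass that maintains the most recent begin index, so the backward rescan of the prefix disappears.
import Mathlib
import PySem

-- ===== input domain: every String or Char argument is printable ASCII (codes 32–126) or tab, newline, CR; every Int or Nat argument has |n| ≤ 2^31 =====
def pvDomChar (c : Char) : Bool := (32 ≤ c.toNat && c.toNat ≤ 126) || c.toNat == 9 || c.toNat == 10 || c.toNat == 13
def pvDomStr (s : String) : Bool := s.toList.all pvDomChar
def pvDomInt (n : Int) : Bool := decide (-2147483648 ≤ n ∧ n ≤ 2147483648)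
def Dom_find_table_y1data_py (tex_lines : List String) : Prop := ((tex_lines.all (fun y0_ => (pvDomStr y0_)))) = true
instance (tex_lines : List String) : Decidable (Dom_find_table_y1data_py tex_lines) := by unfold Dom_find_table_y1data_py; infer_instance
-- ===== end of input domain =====

-- B replaces A's three scans (label search, backward scan for begin, forward scan for end)
-- by one forward pass that remembers the most recent begin line (alternative decomposition).


-- ===== PORT A =====
-- first loop of A: first index i with "\label{tab:Y1data}" in tex_lines[i]
def findStartA (lines : List String) (i : Nat) : Option Nat :=
  match lines with
  | [] => none
  | l :: rest =>
    if PySem.Str.isIn "\\label{tab:Y1data}" l then some i else findStartA rest (i + 1)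

-- second loop of A: for j in range(start, -1, -1), first j with "\begin{tabular" in tex_lines[j].
-- The index j is always in range (start comes from the first loop), so List.getD is exact here.
def findBeginA (lines : List String) : Nat → Option Int
  | 0 => if PySem.Str.isIn "\\begin{tabular" (lines.getD 0 "") then some 0 else none
  | j + 1 =>
    if PySem.Str.isIn "\\begin{tabular" (lines.getD (j + 1) "") then some ((j + 1 : Nat) : Int)
    else findBeginA lines j

-- third loop of A: for j in range(start, len(tex_lines)), first j with "\end{tabular" in tex_lines[j]
def findEndA (lines : List String) (j : Nat) : Option Int :=
  if h : j < lines.length then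
    if PySem.Str.isIn "\\end{tabular" (lines.getD j "") then some (j : Int)
    else findEndA lines (j + 1)
  else none
termination_by lines.length - j

-- A raises on the three None cases; the port returns (-1, -1) there (outside Pre_).
def find_table_y1data_py (tex_lines : List String) : Int × Int :=
  match findStartA tex_lines 0 with
  | none => (-1, -1)
  | some start =>
    match findBeginA tex_lines start with
    | none => (-1, -1)
    | some tab_begin =>
      match findEndA tex_lines start with
      | none => (-1, -1)
      | some tab_end => (tab_begin, tab_end)

-- ===== PORT B =====
-- inner loop of B: first index ≥ j with "\end{tabular" in the remaining lines
def endScanB (suf : List String) (j : Int) : Option Int :=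
  match suf with
  | [] => none
  | l :: rest => if PySem.Str.isIn "\\end{tabular" l then some j else endScanB rest (j + 1)

-- B's single forward pass: lastBegin is the most recent begin index, updated before the label test
def goB (suf : List String) (i : Int) (lastBegin : Option Int) : Int × Int :=
  match suf with
  | [] => (-1, -1)  -- label error
  | l :: rest =>
    let lb := if PySem.Str.isIn "\\begin{tabular" l then some i else lastBegin
    if PySem.Str.isIn "\\label{tab:Y1data}" l then
      match lb with
      | none => (-1, -1)  -- begin error
      | some b =>
        match endScanB (l :: rest) i with
        | none => (-1, -1)  -- end error
        | some e => (b, e)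
    else goB rest (i + 1) lb

def find_table_y1data_py_alt (tex_lines : List String) : Int × Int :=
  goB tex_lines 0 none

-- ===== PRECONDITION & SPEC =====
-- Pre_ excludes exactly the inputs on which A raises ValueError: no line contains the label,
-- or no line up to the label line contains \begin{tabular, or none from it on contains \end{tabular.
def Pre_find_table_y1data_py (tex_lines : List String) : Prop :=
  (match tex_lines.findIdx? (fun l => PySem.Str.isIn "\\label{tab:Y1data}" l) with
   | none => false
   | some s =>
     (tex_lines.take (s + 1)).any (fun l => PySem.Str.isIn "\\begin{tabular" l) &&
     (tex_lines.drop s).any (fun l => PySem.Str.isIn "\\end{tabular" l)) = true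

instance (tex_lines : List String) : Decidable (Pre_find_table_y1data_py tex_lines) := by
  unfold Pre_find_table_y1data_py; infer_instance

def pvWitness_find_table_y1data_py : List String :=
  ["\\begin{tabular}{cc}", "\\label{tab:Y1data}", "1 & 2 \\\\", "\\end{tabular}"]

def Spec_find_table_y1data_py (tex_lines : List String) (out : Int × Int) : Prop :=
  out = find_table_y1data_py_alt tex_lines
instance (tex_lines : List String) (out : Int × Int) : Decidable (Spec_find_table_y1data_py tex_lines out) := by
  unfold Spec_find_table_y1data_py; infer_instance

-- ===== CLAIM (what is proved, stated in full; the proofs are below) =====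
def Claim_equal_find_table_y1data_py : Prop := ∀ (tex_lines : List String), Dom_find_table_y1data_py tex_lines → Pre_find_table_y1data_py tex_lines → Spec_find_table_y1data_py tex_lines (find_table_y1data_py tex_lines)

-- ===== LEMMAS AND PROOFS =====
-- B's lastBegin accumulator, as a function of the processed prefix
def lbAux (pre : List String) (i : Int) (acc : Option Int) : Option Int :=
  match pre with
  | [] => acc
  | l :: rest => lbAux rest (i + 1) (if PySem.Str.isIn "\\begin{tabular" l then some i else acc)

theorem lbAux_append (pre : List String) (l : String) (i : Int) (acc : Option Int) :
    lbAux (pre ++ [l]) i acc =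
      if PySem.Str.isIn "\\begin{tabular" l then some (i + pre.length) else lbAux pre i acc := by
  induction pre generalizing i acc with
  | nil => simp [lbAux]
  | cons a rest ih =>
    simp only [List.cons_append, lbAux, ih]
    split <;> (simp; try ring)

theorem findStartA_none (pre : List String) (i : Nat)
    (h : ∀ l ∈ pre, PySem.Str.isIn "\\label{tab:Y1data}" l = false) :
    findStartA pre i = none := by
  induction pre generalizing i with
  | nil => rfl
  | cons a rest ih =>
    simp only [findStartA, h a (by simp)]
    exact ih _ fun l hl => h l (by simp [hl])

theorem findStartA_append (pre suf : List String) (i : Nat)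
    (h : ∀ l ∈ pre, PySem.Str.isIn "\\label{tab:Y1data}" l = false) :
    findStartA (pre ++ suf) i = findStartA suf (i + pre.length) := by
  induction pre generalizing i with
  | nil => simp
  | cons a rest ih =>
    simp only [List.cons_append, findStartA, h a (by simp)]
    rw [ih _ fun l hl => h l (by simp [hl])]
    simp only [Bool.false_eq_true, if_false, List.length_cons]
    congr 1
    omega

theorem findBeginA_eq (L : List String) (s : Nat) (hs : s < L.length) :
    findBeginA L s = lbAux (L.take (s + 1)) 0 none := by
  induction s with
  | zero =>
    match L, hs with
    | l :: rest, _ => simp [findBeginA, lbAux]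
  | succ j ih =>
    have hj : j < L.length := by omega
    rw [List.take_add_one]
    have hget : L[j + 1]?.toList = [L.getD (j + 1) ""] := by
      simp [List.getD, List.getElem?_eq_getElem hs]
    rw [hget, lbAux_append, List.length_take]
    simp only [findBeginA, ih hj]
    have : (min (j + 1) L.length) = j + 1 := by omega
    rw [this]
    split <;> (simp; try ring)

theorem endScanB_eq (suf pre : List String) :
    endScanB suf (pre.length : Int) = findEndA (pre ++ suf) pre.length := by
  induction suf generalizing pre with
  | nil =>
    rw [endScanB, findEndA]
    simp
  | cons l rest ih =>
    rw [endScanB, findEndA]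
    have hlt : pre.length < (pre ++ l :: rest).length := by simp
    rw [dif_pos hlt]
    have hget : (pre ++ l :: rest).getD pre.length "" = l := by
      simp [List.getD]
    rw [hget]
    split
    · rfl
    · have := ih (pre ++ [l])
      simp only [List.length_append, List.length_cons, List.append_assoc,
        List.cons_append, List.nil_append] at this ⊢
      rw [show ((pre.length : Int) + 1) = ((pre.length + 1 : Nat) : Int) by push_cast; ring]
      exact this

theorem goB_eq (suf pre : List String)
    (hlab : ∀ l ∈ pre, PySem.Str.isIn "\\label{tab:Y1data}" l = false) :
    goB suf (pre.length : Int) (lbAux pre 0 none) = find_table_y1data_py (pre ++ suf) := by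
  induction suf generalizing pre with
  | nil =>
    rw [goB]
    unfold find_table_y1data_py
    rw [List.append_nil, findStartA_none pre 0 hlab]
  | cons l rest ih =>
    rw [goB]
    have hlb : (if PySem.Str.isIn "\\begin{tabular" l then some ((pre.length : Int)) else lbAux pre 0 none)
        = lbAux (pre ++ [l]) 0 none := by
      rw [lbAux_append]; split <;> (simp; try ring)
    by_cases hl : PySem.Str.isIn "\\label{tab:Y1data}" l
    · simp only [hl, if_true]
      unfold find_table_y1data_py
      rw [findStartA_append pre (l :: rest) 0 hlab]
      simp only [findStartA, hl, if_true, Nat.zero_add]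
      have hs : pre.length < (pre ++ l :: rest).length := by simp
      rw [findBeginA_eq _ _ hs]
      have htake : (pre ++ l :: rest).take (pre.length + 1) = pre ++ [l] := by
        rw [List.take_append]
        simp
      rw [htake, ← hlb]
      have hend : endScanB (l :: rest) (pre.length : Int) = findEndA (pre ++ l :: rest) pre.length :=
        endScanB_eq (l :: rest) pre
      rw [← hend]
    · simp only [hl, if_false, Bool.false_eq_true]
      rw [hlb]
      have h2 : ∀ x ∈ pre ++ [l], PySem.Str.isIn "\\label{tab:Y1data}" x = false := by
        intro x hx
        rcases List.mem_append.mp hx with h | h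
        · exact hlab x h
        · simp at h; subst h; simpa using hl
      have := ih (pre ++ [l]) h2
      simp only [List.length_append, List.length_cons, List.append_assoc, List.cons_append,
        List.nil_append] at this ⊢
      rw [show ((pre.length : Int) + 1) = ((pre.length + 1 : Nat) : Int) by push_cast; ring]
      exact this

-- ===== VERDICT (by name: the statement is the Claim_ definition above) =====
theorem find_table_y1data_py_spec : Claim_equal_find_table_y1data_py := by
  intro tex_lines _ _
  unfold Spec_find_table_y1data_py find_table_y1data_py_alt
  have := goB_eq tex_lines [] (by simp)
  simpa [lbAux] using this.symm
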